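-- pv_equiv track=rewrite | github.com/mdc159/studio54 | audit/parse_dump.py | _parse_env_files
-- ===== SOURCE A (Python) =====
-- def _parse_env_files(text: str) -> dict[str, dict[str, str]]:
--     files: dict[str, dict[str, str]] = {}
--     cur_file: str | None = None
--     cur_kv: dict[str, str] = {}
--     for line in text.splitlines():
--         if line.startswith("FILE:"):
--             cur_file = line[len("FILE:"):].strip()
--             cur_kv = {}
--         elif line.startswith("ENDFILE:") and cur_file is not None:
--             files[cur_file] = cur_kv
--             cur_file = None
--             cur_kv = {}
--         elif cur_file is not None:
--             stripped = line.lstrip()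
--             if not stripped or stripped.startswith("#") or "=" not in line:
--                 continue
--             k, v = line.split("=", 1)
--             cur_kv[k.strip()] = v.strip()
--     return files
-- ===== SOURCE B (Python) =====
-- def _block_dict(body: list[str]) -> dict[str, str]:
--     pairs = []
--     for line in body:
--         s = line.lstrip()
--         if s and not s.startswith("#") and "=" in line:
--             k, v = line.split("=", 1)
--             pairs.append((k.strip(), v.strip()))
--     return dict(pairs)
--
--
-- def _parse_env_files(text: str) -> dict[str, dict[str, str]]:
--     # Phase 1: cut the text into complete FILE:/ENDFILE: blocks.
--     blocks = []
--     cur = None  # (name, body-lines) of the block being read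
--     for line in text.splitlines():
--         if line.startswith("FILE:"):
--             cur = (line[len("FILE:"):].strip(), [])
--         elif line.startswith("ENDFILE:"):
--             if cur is not None:
--                 blocks.append(cur)
--                 cur = None
--         elif cur is not None:
--             cur[1].append(line)
--     # Phase 2: parse each block's body independently.
--     return dict((name, _block_dict(body)) for name, body in blocks)
-- ===== Notes on version B (the rewrite author's own statement) =====
-- stated objective: alternative
-- what changed: A's single stateful loop (files/cur_file/cur_kv updated per line) is re-decomposed into two phases: phase 1 cuts the text into complete FILE:/ENDFILE: blocks as (name, body-lines) pairs, phase 2 parses each block body independently into its key-value dict and assembles the outer dict from the block list.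
import Mathlib
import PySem

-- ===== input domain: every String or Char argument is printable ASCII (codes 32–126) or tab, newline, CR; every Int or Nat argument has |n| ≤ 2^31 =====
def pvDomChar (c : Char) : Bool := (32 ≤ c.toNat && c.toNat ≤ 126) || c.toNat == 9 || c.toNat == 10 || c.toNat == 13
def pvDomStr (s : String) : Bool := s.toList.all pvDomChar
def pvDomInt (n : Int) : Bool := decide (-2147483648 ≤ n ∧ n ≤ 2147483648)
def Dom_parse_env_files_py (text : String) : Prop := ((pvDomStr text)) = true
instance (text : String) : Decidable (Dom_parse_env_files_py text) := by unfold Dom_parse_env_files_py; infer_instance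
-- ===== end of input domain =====

-- B re-decomposes A's single stateful loop into two phases (cut text into FILE:/ENDFILE: blocks,
-- then parse each block's body independently); equal return value, same cost ('alternative').

-- ===== PORT A =====
-- one iteration of A's for-loop over (files, cur_file, cur_kv)
def pvStepA (st : PySem.Dict String (PySem.Dict String String) × Option String × PySem.Dict String String)
    (line : String) : PySem.Dict String (PySem.Dict String String) × Option String × PySem.Dict String String :=
  let (files, curFile, curKv) := st
  if PySem.Str.startswith line "FILE:" then
    (files, some (PySem.Str.strip (PySem.Str.slice line (some 5) none)), PySem.Dict.empty)
  else if PySem.Str.startswith line "ENDFILE:" && curFile.isSome then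
    match curFile with
    | some n => (files.insert n curKv, none, PySem.Dict.empty)
    | none => (files, curFile, curKv)
  else
    match curFile with
    | some _ =>
      let stripped := PySem.Str.lstrip line
      if stripped == "" || PySem.Str.startswith stripped "#" || !PySem.Str.isIn "=" line then
        (files, curFile, curKv)
      else
        match PySem.Str.splitMax? line "=" 1 with
        | some (k :: v :: _) =>
            (files, curFile, curKv.insert (PySem.Str.strip k) (PySem.Str.strip v))
        | _ => (files, curFile, curKv)
    | none => (files, curFile, curKv)

def parse_env_files_py (text : String) : List (String × List (String × String)) :=
  (((PySem.Str.splitlines text).foldl pvStepA (PySem.Dict.empty, none, PySem.Dict.empty)).1.items).map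
    (fun p => (p.1, p.2.items))

-- ===== PORT B =====
-- B's _block_dict: collect the (k, v) pairs of one block body, then dict(pairs)
def pvBlockPairs (body : List String) : List (String × String) :=
  body.foldl (fun pairs line =>
    let s := PySem.Str.lstrip line
    if !(s == "") && !PySem.Str.startswith s "#" && PySem.Str.isIn "=" line then
      match PySem.Str.splitMax? line "=" 1 with
      | some (k :: v :: _) => pairs ++ [(PySem.Str.strip k, PySem.Str.strip v)]
      | _ => pairs
    else pairs) []

def pvBlockDict (body : List String) : PySem.Dict String String :=
  PySem.Dict.ofList (pvBlockPairs body)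

-- B's phase 1: one iteration of the block-cutting loop over (blocks, cur)
def pvStepB (st : List (String × List String) × Option (String × List String)) (line : String) :
    List (String × List String) × Option (String × List String) :=
  if PySem.Str.startswith line "FILE:" then
    (st.1, some (PySem.Str.strip (PySem.Str.slice line (some 5) none), []))
  else if PySem.Str.startswith line "ENDFILE:" then
    match st.2 with
    | some b => (st.1 ++ [b], none)
    | none => st
  else
    match st.2 with
    | some (n, body) => (st.1, some (n, body ++ [line]))
    | none => st

def parse_env_files_py_alt (text : String) : List (String × List (String × String)) :=
  let blocks := ((PySem.Str.splitlines text).foldl pvStepB ([], none)).1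
  (PySem.Dict.ofList (blocks.map (fun b => (b.1, pvBlockDict b.2)))).items.map
    (fun p => (p.1, p.2.items))

-- ===== PRECONDITION & SPEC =====
def Spec_parse_env_files_py (text : String) (out : List (String × List (String × String))) : Prop :=
  out = parse_env_files_py_alt text
instance (text : String) (out : List (String × List (String × String))) :
    Decidable (Spec_parse_env_files_py text out) := by unfold Spec_parse_env_files_py; infer_instance

-- ===== CLAIM (what is proved, stated in full; the proofs are below) =====
def Claim_equal_parse_env_files_py : Prop :=
  ∀ (text : String), Dom_parse_env_files_py text → Spec_parse_env_files_py text (parse_env_files_py text)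

-- ===== LEMMAS AND PROOFS =====

-- the cur_kv dict A carries, expressed from B's in-progress block
def pvKvOf : Option (String × List String) → PySem.Dict String String
  | none => PySem.Dict.empty
  | some b => pvBlockDict b.2

-- dict(pairs ++ [(k, v)]) inserts (k, v) last
theorem pvOfList_append_singleton (xs : List (String × String)) (p : String × String) :
    PySem.Dict.ofList (xs ++ [p]) = (PySem.Dict.ofList xs).insert p.1 p.2 := by
  show (xs ++ [p]).foldl (fun d q => d.insert q.1 q.2) PySem.Dict.empty = _
  rw [List.foldl_append]
  rfl

-- appending a line to a block body applies the per-line step to its pair list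
theorem pvBlockPairs_append (body : List String) (line : String) :
    pvBlockPairs (body ++ [line]) =
      (let s := PySem.Str.lstrip line
       if !(s == "") && !PySem.Str.startswith s "#" && PySem.Str.isIn "=" line then
         match PySem.Str.splitMax? line "=" 1 with
         | some (k :: v :: _) => pvBlockPairs body ++ [(PySem.Str.strip k, PySem.Str.strip v)]
         | _ => pvBlockPairs body
       else pvBlockPairs body) := by
  unfold pvBlockPairs
  rw [List.foldl_append]
  rfl

-- on a FILE: line A opens a fresh (name, empty) state, whatever the previous state was
theorem pvStepA_file (files : PySem.Dict String (PySem.Dict String String)) (cf : Option String)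
    (kv : PySem.Dict String String) (line : String)
    (hf : PySem.Str.startswith line "FILE:" = true) :
    pvStepA (files, cf, kv) line
      = (files, some (PySem.Str.strip (PySem.Str.slice line (some 5) none)), PySem.Dict.empty) := by
  simp only [pvStepA, hf, if_true]

-- on an ENDFILE: line with a file open, A commits the block
theorem pvStepA_end (files : PySem.Dict String (PySem.Dict String String)) (n : String)
    (kv : PySem.Dict String String) (line : String)
    (hf : ¬ PySem.Str.startswith line "FILE:" = true)
    (he : PySem.Str.startswith line "ENDFILE:" = true) :
    pvStepA (files, some n, kv) line = (files.insert n kv, none, PySem.Dict.empty) := by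
  rw [Bool.not_eq_true] at hf
  simp only [pvStepA, hf, he, Bool.false_eq_true, if_false, Option.isSome_some, Bool.and_true,
    if_true]

-- with no file open, a non-FILE: line leaves A's state unchanged
theorem pvStepA_none (files : PySem.Dict String (PySem.Dict String String))
    (kv : PySem.Dict String String) (line : String)
    (hf : ¬ PySem.Str.startswith line "FILE:" = true) :
    pvStepA (files, none, kv) line = (files, none, kv) := by
  rw [Bool.not_eq_true] at hf
  simp only [pvStepA, hf, Bool.false_eq_true, if_false, Option.isSome_none, Bool.and_false]

-- on a body line (neither marker) A updates cur_kv exactly as appending the line to B's block body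
theorem pvStepA_body (files : PySem.Dict String (PySem.Dict String String)) (n : String)
    (body : List String) (line : String)
    (hf : ¬ PySem.Str.startswith line "FILE:" = true)
    (he : ¬ PySem.Str.startswith line "ENDFILE:" = true) :
    pvStepA (files, some n, pvBlockDict body) line
      = (files, some n, pvBlockDict (body ++ [line])) := by
  rw [Bool.not_eq_true] at hf he
  unfold pvBlockDict
  rw [pvBlockPairs_append]
  simp only [pvStepA, hf, he, Bool.false_eq_true, if_false, Bool.false_and]
  by_cases h1 : (PySem.Str.lstrip line == "") = true
  · simp only [h1, Bool.true_or, if_true, Bool.not_true, Bool.false_and, Bool.false_eq_true,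
      if_false]
  · rw [Bool.not_eq_true] at h1
    simp only [h1, Bool.false_or, Bool.not_false, Bool.true_and]
    by_cases h2 : PySem.Str.startswith (PySem.Str.lstrip line) "#" = true
    · simp only [h2, Bool.true_or, if_true, Bool.not_true, Bool.false_and, Bool.false_eq_true,
        if_false]
    · rw [Bool.not_eq_true] at h2
      simp only [h2, Bool.false_or, Bool.not_false, Bool.true_and]
      by_cases h3 : PySem.Str.isIn "=" line = true
      · simp only [h3, Bool.not_true, Bool.false_eq_true, if_false, if_true]
        cases hsp : PySem.Str.splitMax? line "=" 1 with
        | none => rfl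
        | some parts =>
            match parts with
            | [] => rfl
            | [k] => rfl
            | k :: v :: t => simp only [pvOfList_append_singleton]
      · rw [Bool.not_eq_true] at h3
        simp only [h3, Bool.not_false, if_true, Bool.false_eq_true, if_false]

-- one step of B's cutting loop: the blocks accumulator only ever grows at the right
theorem pvStepB_factor (blocks : List (String × List String))
    (cur : Option (String × List String)) (line : String) :
    pvStepB (blocks, cur) line =
      (blocks ++ (pvStepB ([], cur) line).1, (pvStepB ([], cur) line).2) := by
  unfold pvStepB
  cases cur with
  | none => split_ifs <;> simp
  | some b => split_ifs <;> simp

-- the whole cutting loop factors over the initial blocks accumulator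
theorem pvLoopB_factor (lines : List String) (blocks : List (String × List String))
    (cur : Option (String × List String)) :
    lines.foldl pvStepB (blocks, cur) =
      (blocks ++ (lines.foldl pvStepB ([], cur)).1, (lines.foldl pvStepB ([], cur)).2) := by
  induction lines generalizing blocks cur with
  | nil => simp
  | cons line rest ih =>
      simp only [List.foldl_cons]
      rw [pvStepB_factor blocks cur line]
      rw [ih (blocks ++ (pvStepB ([], cur) line).1) (pvStepB ([], cur) line).2]
      rw [ih (pvStepB ([], cur) line).1 (pvStepB ([], cur) line).2]
      simp

-- B's step on each kind of line
theorem pvStepB_file (st : List (String × List String) × Option (String × List String))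
    (line : String) (hf : PySem.Str.startswith line "FILE:" = true) :
    pvStepB st line
      = (st.1, some (PySem.Str.strip (PySem.Str.slice line (some 5) none), [])) := by
  simp only [pvStepB, hf, if_true]

theorem pvStepB_end_some (blocks : List (String × List String)) (b : String × List String)
    (line : String)
    (hf : ¬ PySem.Str.startswith line "FILE:" = true)
    (he : PySem.Str.startswith line "ENDFILE:" = true) :
    pvStepB (blocks, some b) line = (blocks ++ [b], none) := by
  rw [Bool.not_eq_true] at hf
  simp only [pvStepB, hf, he, Bool.false_eq_true, if_false, if_true]

theorem pvStepB_end_none (blocks : List (String × List String)) (line : String)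
    (hf : ¬ PySem.Str.startswith line "FILE:" = true)
    (he : PySem.Str.startswith line "ENDFILE:" = true) :
    pvStepB (blocks, none) line = (blocks, none) := by
  rw [Bool.not_eq_true] at hf
  simp only [pvStepB, hf, he, Bool.false_eq_true, if_false, if_true]

theorem pvStepB_other_some (blocks : List (String × List String)) (n : String)
    (body : List String) (line : String)
    (hf : ¬ PySem.Str.startswith line "FILE:" = true)
    (he : ¬ PySem.Str.startswith line "ENDFILE:" = true) :
    pvStepB (blocks, some (n, body)) line = (blocks, some (n, body ++ [line])) := by
  rw [Bool.not_eq_true] at hf he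
  simp only [pvStepB, hf, he, Bool.false_eq_true, if_false]

theorem pvStepB_other_none (blocks : List (String × List String)) (line : String)
    (hf : ¬ PySem.Str.startswith line "FILE:" = true)
    (he : ¬ PySem.Str.startswith line "ENDFILE:" = true) :
    pvStepB (blocks, none) line = (blocks, none) := by
  rw [Bool.not_eq_true] at hf he
  simp only [pvStepB, hf, he, Bool.false_eq_true, if_false]

-- main loop correspondence: A's files dict is B's emitted blocks folded in as inserts
theorem pvMain (lines : List String)
    (files : PySem.Dict String (PySem.Dict String String))
    (cur : Option (String × List String)) :
    (lines.foldl pvStepA (files, cur.map Prod.fst, pvKvOf cur)).1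
      = (lines.foldl pvStepB ([], cur)).1.foldl
          (fun d b => d.insert b.1 (pvBlockDict b.2)) files := by
  induction lines generalizing files cur with
  | nil => simp
  | cons line rest ih =>
      simp only [List.foldl_cons]
      by_cases hf : PySem.Str.startswith line "FILE:" = true
      · rw [pvStepA_file _ _ _ _ hf, pvStepB_file _ _ hf]
        have : PySem.Dict.empty
            = pvKvOf (some (PySem.Str.strip (PySem.Str.slice line (some 5) none), [])) := rfl
        rw [this]
        exact ih files (some (PySem.Str.strip (PySem.Str.slice line (some 5) none), []))
      · by_cases he : PySem.Str.startswith line "ENDFILE:" = true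
        · cases cur with
          | none =>
              rw [show pvKvOf none = PySem.Dict.empty from rfl]
              simp only [Option.map_none]
              rw [pvStepA_none _ _ _ hf, pvStepB_end_none _ _ hf he]
              exact ih files none
          | some b =>
              obtain ⟨n, body⟩ := b
              rw [show pvKvOf (some (n, body)) = pvBlockDict body from rfl]
              simp only [Option.map_some]
              rw [pvStepA_end _ _ _ _ hf he, pvStepB_end_some _ _ _ hf he]
              have h1 := ih (files.insert n (pvBlockDict body)) none
              rw [show pvKvOf none = PySem.Dict.empty from rfl] at h1
              simp only [Option.map_none] at h1
              rw [h1]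
              simp only [List.nil_append]
              rw [pvLoopB_factor rest [(n, body)] none]
              simp
        · cases cur with
          | none =>
              rw [show pvKvOf none = PySem.Dict.empty from rfl]
              simp only [Option.map_none]
              rw [pvStepA_none _ _ _ hf, pvStepB_other_none _ _ hf he]
              exact ih files none
          | some b =>
              obtain ⟨n, body⟩ := b
              rw [show pvKvOf (some (n, body)) = pvBlockDict body from rfl]
              simp only [Option.map_some]
              rw [pvStepA_body _ _ _ _ hf he, pvStepB_other_some _ _ _ _ hf he]
              have h1 := ih files (some (n, body ++ [line]))
              rw [show pvKvOf (some (n, body ++ [line])) = pvBlockDict (body ++ [line]) from rfl]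
                at h1
              simp only [Option.map_some] at h1
              exact h1

-- ===== VERDICT (by name: the statement is the Claim_ definition above) =====
theorem parse_env_files_py_spec : Claim_equal_parse_env_files_py := by
  intro text _
  show parse_env_files_py text = parse_env_files_py_alt text
  unfold parse_env_files_py parse_env_files_py_alt
  have h := pvMain (PySem.Str.splitlines text) PySem.Dict.empty none
  simp only [Option.map_none, pvKvOf] at h
  rw [h]
  congr 1
  show _ = (PySem.Dict.ofList (((PySem.Str.splitlines text).foldl pvStepB ([], none)).1.map
      (fun b => (b.1, pvBlockDict b.2)))).items
  congr 1
  show _ = (((PySem.Str.splitlines text).foldl pvStepB ([], none)).1.map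
      (fun b => (b.1, pvBlockDict b.2))).foldl (fun d q => d.insert q.1 q.2) PySem.Dict.empty
  rw [List.foldl_map]
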